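-- pv_equiv track=rewrite | github.com/Lucky-Lodhi2004/Coffy | coffy/graph/executor.py | _join_matches
-- ===== SOURCE A (Python) =====
-- def _join_matches(pattern_matches):
--     """
--     pattern_matches: List[List[dict]]
--     Joins them on shared variable names.
--     Returns: List[dict]
--     """
--     if not pattern_matches:
--         return []
--
--     result = pattern_matches[0]
--     for next_match in pattern_matches[1:]:
--         joined = []
--         for r in result:
--             for n in next_match:
--                 # Only keep if no conflicting assignments for shared variables
--                 if all((k not in r or r[k] == n[k]) for k in n):
--                     merged = r.copy()
--                     merged.update(n)
--                     joined.append(merged)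
--         result = joined
--     return result
-- ===== SOURCE B (Python) =====
-- def _join_matches(pattern_matches):
--     """
--     pattern_matches: List[List[dict]]
--     Joins them on shared variable names.
--     Returns: List[dict]
--     """
--     if not pattern_matches:
--         return []
--
--     result = pattern_matches[0]
--     for next_match in pattern_matches[1:]:
--         # Build an inverted index over next_match once per join step:
--         #   has[k]      = set of row ids whose dict contains key k
--         #   idx[(k, v)] = set of row ids whose dict maps k to v
--         has = {}
--         idx = {}
--         for i, n in enumerate(next_match):
--             for k, v in n.items():
--                 has.setdefault(k, set()).add(i)
--                 idx.setdefault((k, v), set()).add(i)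
--         joined = []
--         for r in result:
--             # Probe: intersect posting sets, keeping next_match order via row ids.
--             cand = list(range(len(next_match)))
--             for k, v in r.items():
--                 h = has.get(k, ())
--                 ok = idx.get((k, v), ())
--                 cand = [i for i in cand if i not in h or i in ok]
--             for i in cand:
--                 joined.append({**r, **next_match[i]})
--         result = joined
--     return result
-- ===== Notes on version B (the rewrite author's own statement) =====
-- stated objective: alternative
-- what changed: Replaces A's nested-scan join step (for every result row, rescan all of next_match and recheck every key) by an inverted-index join: each join step builds hash indexes of next_match by key and by (key, value) into sets of row ids, then each result row is matched by intersecting posting sets, the surviving row ids (in next_match order) giving the merges.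
import Mathlib
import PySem

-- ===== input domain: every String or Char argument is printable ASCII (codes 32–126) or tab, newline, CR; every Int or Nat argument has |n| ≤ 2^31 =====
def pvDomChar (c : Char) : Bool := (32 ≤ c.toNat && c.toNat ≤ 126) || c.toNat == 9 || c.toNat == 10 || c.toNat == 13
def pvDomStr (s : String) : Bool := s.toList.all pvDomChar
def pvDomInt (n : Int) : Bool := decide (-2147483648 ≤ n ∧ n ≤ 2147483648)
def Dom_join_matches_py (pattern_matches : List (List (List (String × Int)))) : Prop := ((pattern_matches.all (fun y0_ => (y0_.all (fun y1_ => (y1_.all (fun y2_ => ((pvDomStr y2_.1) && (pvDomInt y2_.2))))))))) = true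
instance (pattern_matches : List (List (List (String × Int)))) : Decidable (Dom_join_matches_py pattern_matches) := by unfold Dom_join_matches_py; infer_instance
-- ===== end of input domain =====

-- B replaces A's nested-scan join step (for each result row, re-scan all of next_match and
-- re-check every key) by an inverted-index join: per join step it indexes next_match once by
-- key and by (key, value) into sets of row ids, then probes per result row by intersecting
-- posting sets, keeping next_match order via the row ids (objective: alternative).

-- ===== PORT A =====
-- A's compatibility test: all(k not in r or r[k] == n[k] for k in n)
def pvCompatA (r n : PySem.Dict String Int) : Bool :=
  n.keys.all (fun k => !(r.contains k) || (r.get? k == n.get? k))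

-- A's loop nest on dict values: result over pattern_matches[1:], joined accumulator
def pvJoinA (pms : List (List (PySem.Dict String Int))) : List (PySem.Dict String Int) :=
  match pms with
  | [] => []
  | first :: rest =>
      rest.foldl (fun result next_match =>
        result.foldl (fun joined r =>
          next_match.foldl (fun joined n =>
            if pvCompatA r n then joined ++ [r.update n.items] else joined) joined) []) first

def join_matches_py (pattern_matches : List (List (List (String × Int)))) : List (List (String × Int)) :=
  (pvJoinA (pattern_matches.map (fun m => m.map PySem.Dict.ofList))).map PySem.Dict.items

-- ===== PORT B =====
-- B's index build: for i, n in enumerate(next_match): for k, v in n.items():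
--   has.setdefault(k, set()).add(i); idx.setdefault((k, v), set()).add(i)
-- (setdefault-then-mutating-add is exactly Dict.modify with a Set.empty default)
def pvBuildIdx (next : List (PySem.Dict String Int)) :
    PySem.Dict String (PySem.Set Int) × PySem.Dict (String × Int) (PySem.Set Int) :=
  (PySem.List.enumerate next 0).foldl
    (fun acc p =>
      p.2.items.foldl
        (fun acc kv =>
          (acc.1.modify kv.1 PySem.Set.empty (fun s => PySem.Set.add s p.1),
           acc.2.modify (kv.1, kv.2) PySem.Set.empty (fun s => PySem.Set.add s p.1)))
        acc)
    (PySem.Dict.empty, PySem.Dict.empty)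

-- B's probe: cand = list(range(len(next_match))); for k, v in r.items():
--   h = has.get(k, ()); ok = idx.get((k, v), ()); cand = [i for i in cand if i not in h or i in ok]
def pvProbe (has : PySem.Dict String (PySem.Set Int))
    (idx : PySem.Dict (String × Int) (PySem.Set Int)) (N : Int)
    (r : PySem.Dict String Int) : List Int :=
  r.items.foldl
    (fun cand kv =>
      let h := has.getD kv.1 PySem.Set.empty
      let ok := idx.getD (kv.1, kv.2) PySem.Set.empty
      cand.filter (fun i => !(PySem.Set.contains h i) || PySem.Set.contains ok i))
    (PySem.List.pyRange 0 N 1)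

-- B's join step: probe per result row, then joined.append({**r, **next_match[i]})
-- (next_match[i] with i always a surviving row id of range(len(next_match)): pyGetD is exact here)
def pvJoinStepB (result next : List (PySem.Dict String Int)) : List (PySem.Dict String Int) :=
  let hi := pvBuildIdx next
  result.foldl (fun joined r =>
    (pvProbe hi.1 hi.2 (PySem.List.len next) r).foldl
      (fun joined i => joined ++ [r.update (PySem.List.pyGetD next i PySem.Dict.empty).items])
      joined) []

def pvJoinB (pms : List (List (PySem.Dict String Int))) : List (PySem.Dict String Int) :=
  match pms with
  | [] => []
  | first :: rest => rest.foldl (fun result next_match => pvJoinStepB result next_match) first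

def join_matches_py_alt (pattern_matches : List (List (List (String × Int)))) : List (List (String × Int)) :=
  (pvJoinB (pattern_matches.map (fun m => m.map PySem.Dict.ofList))).map PySem.Dict.items

-- ===== PRECONDITION & SPEC =====
def Spec_join_matches_py (pattern_matches : List (List (List (String × Int)))) (out : List (List (String × Int))) : Prop := out = join_matches_py_alt pattern_matches
instance (pattern_matches : List (List (List (String × Int)))) (out : List (List (String × Int))) : Decidable (Spec_join_matches_py pattern_matches out) := by unfold Spec_join_matches_py; infer_instance

-- ===== CLAIM (what is proved, stated in full; the proofs are below) =====
def Claim_equal_join_matches_py : Prop := ∀ (pattern_matches : List (List (List (String × Int)))), Dom_join_matches_py pattern_matches → Spec_join_matches_py pattern_matches (join_matches_py pattern_matches)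

-- ===== LEMMAS AND PROOFS =====

-- membership in one inverted-index dict after folding one row's items in
lemma pv_mem_getD_foldl_modify {κ : Type} [BEq κ] [LawfulBEq κ] [DecidableEq κ]
    (items : List (String × Int)) (key : String × Int → κ) (j i : Int) (q : κ) :
    ∀ (d : PySem.Dict κ (PySem.Set Int)),
    (i ∈ (items.foldl (fun d kv => d.modify (key kv) PySem.Set.empty
        (fun s => PySem.Set.add s j)) d).getD q PySem.Set.empty
      ↔ i ∈ d.getD q PySem.Set.empty ∨ (i = j ∧ ∃ kv ∈ items, key kv = q)) := by
  induction items with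
  | nil => intro d; simp
  | cons kv rest ih =>
    intro d
    simp only [List.foldl_cons]
    rw [ih, PySem.Dict.getD_modify]
    by_cases hq : q = key kv
    · simp only [hq, List.mem_cons, PySem.Set.mem_add, if_pos]
      constructor
      · rintro (⟨h | rfl⟩ | ⟨rfl, kv', hkv', hk⟩)
        · exact Or.inl h
        · exact Or.inr ⟨rfl, kv, Or.inl rfl, rfl⟩
        · exact Or.inr ⟨rfl, kv', Or.inr hkv', hk⟩
      · rintro (h | ⟨rfl, kv', rfl | hm, hk⟩)
        · exact Or.inl (Or.inl h)
        · exact Or.inl (Or.inr rfl)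
        · exact Or.inr ⟨rfl, kv', hm, hk⟩
    · simp only [if_neg hq, List.mem_cons]
      constructor
      · rintro (h | ⟨rfl, kv', hkv', hk⟩)
        · exact Or.inl h
        · exact Or.inr ⟨rfl, kv', Or.inr hkv', hk⟩
      · rintro (h | ⟨rfl, kv', rfl | hm, hk⟩)
        · exact Or.inl h
        · exact absurd hk.symm hq
        · exact Or.inr ⟨rfl, kv', hm, hk⟩

-- membership in one inverted-index dict after the whole build fold
lemma pv_mem_getD_build {κ : Type} [BEq κ] [LawfulBEq κ] [DecidableEq κ]
    (L : List (Int × PySem.Dict String Int)) (key : String × Int → κ) (i : Int) (q : κ) :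
    ∀ (d : PySem.Dict κ (PySem.Set Int)),
    (i ∈ (L.foldl (fun d p => p.2.items.foldl (fun d kv => d.modify (key kv) PySem.Set.empty
        (fun s => PySem.Set.add s p.1)) d) d).getD q PySem.Set.empty
      ↔ i ∈ d.getD q PySem.Set.empty ∨ ∃ p ∈ L, i = p.1 ∧ ∃ kv ∈ p.2.items, key kv = q) := by
  induction L with
  | nil => intro d; simp
  | cons p rest ih =>
    intro d
    simp only [List.foldl_cons]
    rw [ih, pv_mem_getD_foldl_modify]
    constructor
    · rintro (⟨h | ⟨rfl, kv, hkv, hk⟩⟩ | ⟨p', hp', rfl, kv, hkv, hk⟩)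
      · exact Or.inl h
      · exact Or.inr ⟨p, List.mem_cons_self .., rfl, kv, hkv, hk⟩
      · exact Or.inr ⟨p', List.mem_cons_of_mem _ hp', rfl, kv, hkv, hk⟩
    · rintro (h | ⟨p', hp', rfl, kv, hkv, hk⟩)
      · exact Or.inl (Or.inl h)
      · rcases List.mem_cons.1 hp' with rfl | hm
        · exact Or.inl (Or.inr ⟨rfl, kv, hkv, hk⟩)
        · exact Or.inr ⟨p', hm, rfl, kv, hkv, hk⟩

-- the two components of pvBuildIdx are two independent folds
lemma pvBuildIdx_eq (next : List (PySem.Dict String Int)) :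
    pvBuildIdx next = ((PySem.List.enumerate next 0).foldl
      (fun d p => p.2.items.foldl (fun d kv => d.modify kv.1 PySem.Set.empty
        (fun s => PySem.Set.add s p.1)) d) PySem.Dict.empty,
      (PySem.List.enumerate next 0).foldl
      (fun d p => p.2.items.foldl (fun d kv => d.modify (kv.1, kv.2) PySem.Set.empty
        (fun s => PySem.Set.add s p.1)) d) PySem.Dict.empty) := by
  unfold pvBuildIdx
  rw [show (fun (acc : PySem.Dict String (PySem.Set Int) × PySem.Dict (String × Int) (PySem.Set Int)) (p : Int × PySem.Dict String Int) =>
      p.2.items.foldl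
        (fun acc kv =>
          (acc.1.modify kv.1 PySem.Set.empty (fun s => PySem.Set.add s p.1),
           acc.2.modify (kv.1, kv.2) PySem.Set.empty (fun s => PySem.Set.add s p.1)))
        acc)
    = (fun acc p =>
        (p.2.items.foldl (fun d kv => d.modify kv.1 PySem.Set.empty (fun s => PySem.Set.add s p.1)) acc.1,
         p.2.items.foldl (fun d kv => d.modify (kv.1, kv.2) PySem.Set.empty (fun s => PySem.Set.add s p.1)) acc.2)) from by
      funext acc p
      rw [show acc = (acc.1, acc.2) from rfl]
      exact PySem.List.foldl_prod_mk
        (f := fun (d : PySem.Dict String (PySem.Set Int)) (kv : String × Int) => d.modify kv.1 PySem.Set.empty (fun s => PySem.Set.add s p.1))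
        (g := fun (d : PySem.Dict (String × Int) (PySem.Set Int)) (kv : String × Int) => d.modify (kv.1, kv.2) PySem.Set.empty (fun s => PySem.Set.add s p.1))
        _ _ _]
  exact PySem.List.foldl_prod_mk
    (f := fun (d : PySem.Dict String (PySem.Set Int)) (p : Int × PySem.Dict String Int) => p.2.items.foldl (fun d kv => d.modify kv.1 PySem.Set.empty (fun s => PySem.Set.add s p.1)) d)
    (g := fun (d : PySem.Dict (String × Int) (PySem.Set Int)) (p : Int × PySem.Dict String Int) => p.2.items.foldl (fun d kv => d.modify (kv.1, kv.2) PySem.Set.empty (fun s => PySem.Set.add s p.1)) d)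
    _ _ _

-- row-id membership in 'has': row k' contains the key
lemma pv_mem_has (next : List (PySem.Dict String Int)) (k' : Nat) (hk : k' < next.length) (k : String) :
    ((k' : Int) ∈ ((pvBuildIdx next).1.getD k PySem.Set.empty) ↔ next[k'].contains k = true) := by
  rw [pvBuildIdx_eq]
  rw [show (((PySem.List.enumerate next 0).foldl
      (fun d p => p.2.items.foldl (fun d kv => d.modify kv.1 PySem.Set.empty
        (fun s => PySem.Set.add s p.1)) d) PySem.Dict.empty, _ ) :
      PySem.Dict String (PySem.Set Int) × PySem.Dict (String × Int) (PySem.Set Int)).1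
    = (PySem.List.enumerate next 0).foldl
      (fun d p => p.2.items.foldl (fun d kv => d.modify kv.1 PySem.Set.empty
        (fun s => PySem.Set.add s p.1)) d) PySem.Dict.empty from rfl]
  rw [pv_mem_getD_build (PySem.List.enumerate next 0) (fun kv => kv.1) (k' : Int) k PySem.Dict.empty]
  rw [PySem.Dict.getD_empty]
  simp only [PySem.List.mem_enumerate_iff]
  constructor
  · rintro (h | ⟨p, ⟨m, hm, rfl⟩, hi, kv, hkv, rfl⟩)
    · cases h
    · simp only [zero_add] at hi
      have : m = k' := by exact_mod_cast hi.symm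
      subst this
      rw [PySem.Dict.contains_iff_mem_keys]
      exact List.mem_map_of_mem hkv
  · intro h
    rw [PySem.Dict.contains_iff_mem_keys] at h
    rcases List.mem_map.1 h with ⟨kv, hkv, rfl⟩
    exact Or.inr ⟨((k' : Int), next[k']), ⟨k', hk, by simp⟩, by simp, kv, hkv, rfl⟩

-- row-id membership in 'idx': row k' has item (k, v)
lemma pv_mem_idx (next : List (PySem.Dict String Int)) (k' : Nat) (hk : k' < next.length) (k : String) (v : Int) :
    ((k' : Int) ∈ ((pvBuildIdx next).2.getD (k, v) PySem.Set.empty) ↔ (k, v) ∈ next[k'].items) := by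
  rw [pvBuildIdx_eq]
  rw [show ((( _ , (PySem.List.enumerate next 0).foldl
      (fun d p => p.2.items.foldl (fun d kv => d.modify (kv.1, kv.2) PySem.Set.empty
        (fun s => PySem.Set.add s p.1)) d) PySem.Dict.empty) :
      PySem.Dict String (PySem.Set Int) × PySem.Dict (String × Int) (PySem.Set Int))).2
    = (PySem.List.enumerate next 0).foldl
      (fun d p => p.2.items.foldl (fun d kv => d.modify (kv.1, kv.2) PySem.Set.empty
        (fun s => PySem.Set.add s p.1)) d) PySem.Dict.empty from rfl]
  rw [pv_mem_getD_build (PySem.List.enumerate next 0) (fun kv => (kv.1, kv.2)) (k' : Int) (k, v) PySem.Dict.empty]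
  rw [PySem.Dict.getD_empty]
  simp only [PySem.List.mem_enumerate_iff]
  constructor
  · rintro (h | ⟨p, ⟨m, hm, rfl⟩, hi, kv, hkv, hkey⟩)
    · cases h
    · simp only [zero_add] at hi
      have : m = k' := by exact_mod_cast hi.symm
      subst this
      rwa [show kv = (k, v) from by rw [← hkey]] at hkv
  · intro h
    exact Or.inr ⟨((k' : Int), next[k']), ⟨k', hk, by simp⟩, by simp, (k, v), h, rfl⟩

-- a fold of filters is one filter by the conjunction
lemma pv_foldl_filter {α β : Type} (l : List α) (q : α → β → Bool) :
    ∀ (cand : List β),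
    l.foldl (fun cand kv => cand.filter (q kv)) cand
      = cand.filter (fun i => l.all (fun kv => q kv i)) := by
  induction l with
  | nil => intro cand; simp
  | cons kv rest ih =>
    intro cand
    simp only [List.foldl_cons]
    rw [ih, List.filter_filter]
    simp [Bool.and_comm]

-- the probe condition at row id k' is exactly A's compatibility test
lemma pv_cond_eq_compat (next : List (PySem.Dict String Int)) (r : PySem.Dict String Int)
    (hr : r.keys.Nodup) (k' : Nat) (hk : k' < next.length) (hn : next[k'].keys.Nodup) :
    (r.items.all (fun kv =>
        !(PySem.Set.contains ((pvBuildIdx next).1.getD kv.1 PySem.Set.empty) (k' : Int))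
        || PySem.Set.contains ((pvBuildIdx next).2.getD (kv.1, kv.2) PySem.Set.empty) (k' : Int)))
      = pvCompatA r next[k'] := by
  rw [Bool.eq_iff_iff]
  unfold pvCompatA
  simp only [List.all_eq_true, Bool.or_eq_true, Bool.not_eq_eq_eq_not, Bool.not_true,
    PySem.Set.contains_eq_listContains, List.contains_eq_mem, decide_eq_false_iff_not,
    decide_eq_true_eq, beq_iff_eq]
  constructor
  · intro H k hkk
    by_cases hcont : r.contains k = true
    · right
      have hs : (r.get? k).isSome = true := by
        rw [← PySem.Dict.contains_eq_isSome_get?]; exact hcont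
      rcases Option.isSome_iff_exists.1 hs with ⟨v, hv⟩
      have hitem : (k, v) ∈ r.items := PySem.Dict.mem_items_of_get?_eq_some _ hv
      rcases H (k, v) hitem with hno | hyes
      · exact absurd ((pv_mem_has next k' hk k).2 ((PySem.Dict.contains_iff_mem_keys _ _).2 hkk)) hno
      · have := (pv_mem_idx next k' hk k v).1 hyes
        rw [hv, PySem.Dict.get?_of_mem_items _ this hn]
    · exact Or.inl (Bool.not_eq_true _ ▸ (by simpa using hcont))
  · intro H kv hkv
    by_cases hc : (k' : Int) ∈ (pvBuildIdx next).1.getD kv.1 PySem.Set.empty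
    · right
      have hcont := (pv_mem_has next k' hk kv.1).1 hc
      have hkk : kv.1 ∈ next[k'].keys := (PySem.Dict.contains_iff_mem_keys _ _).1 hcont
      have hrget : r.get? kv.1 = some kv.2 := PySem.Dict.get?_of_mem_items _ (by simpa using hkv) hr
      have hnget : next[k'].get? kv.1 = some kv.2 := by
        rcases H kv.1 hkk with hf | he
        · rw [PySem.Dict.contains_eq_isSome_get?, hrget] at hf; cases hf
        · rw [← he, hrget]
      exact (pv_mem_idx next k' hk kv.1 kv.2).2 (PySem.Dict.mem_items_of_get?_eq_some _ hnget)
    · exact Or.inl hc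

-- mapping a function of next[k] over the filtered range is filter-then-map over next
lemma pv_filter_range_map {α β : Type} (next : List α) (P : Nat → Bool) (Q : α → Bool)
    (g : α → β) (d : α) (h : ∀ (k : Nat) (hk : k < next.length), P k = Q next[k]) :
    ((List.range next.length).filter P).map (fun k => g (next.getD k d)) = (next.filter Q).map g := by
  induction next using List.reverseRecOn with
  | nil => simp
  | append_singleton next₀ x ih =>
    have hlen : (next₀ ++ [x]).length = next₀.length + 1 := by simp
    rw [hlen, List.range_succ, List.filter_append, List.map_append, List.filter_append,
      List.map_append]
    congr 1
    · rw [List.map_congr_left (f := fun k => g ((next₀ ++ [x]).getD k d))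
        (g := fun k => g (next₀.getD k d)) ?_]
      · apply ih
        intro k hk
        have := h k (by simp; omega)
        rwa [List.getElem_append_left hk] at this
      · intro k hkmem
        have hk : k < next₀.length := List.mem_range.1 (List.mem_of_mem_filter hkmem)
        simp only [List.getD, List.getElem?_append_left hk]
    · have hx : P next₀.length = Q x := by
        simpa using h next₀.length (by simp)
      by_cases hq : Q x = true
      · simp [hq, hx, List.getD]
      · simp only [Bool.not_eq_true] at hq
        simp [hq, hx]

-- B's probe-then-merge per row equals A's filtered scan per row
lemma pv_probe_map (next : List (PySem.Dict String Int)) (r : PySem.Dict String Int)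
    (hnext : ∀ n ∈ next, n.keys.Nodup) (hr : r.keys.Nodup) :
    (pvProbe (pvBuildIdx next).1 (pvBuildIdx next).2 (PySem.List.len next) r).map
        (fun i => r.update (PySem.List.pyGetD next i PySem.Dict.empty).items)
      = (next.filter (fun n => pvCompatA r n)).map (fun n => r.update n.items) := by
  unfold pvProbe
  rw [pv_foldl_filter]
  have hrange : PySem.List.pyRange 0 (PySem.List.len next) 1
      = (List.range next.length).map (Nat.cast : Nat → Int) := by
    rw [PySem.List.len_eq, PySem.List.pyRange_one]
    simp only [sub_zero, Int.toNat_natCast, zero_add]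
  rw [hrange, List.filter_map, List.map_map]
  have := pv_filter_range_map next
    (P := fun k => r.items.all (fun kv =>
        !(PySem.Set.contains ((pvBuildIdx next).1.getD kv.1 PySem.Set.empty) (k : Int))
        || PySem.Set.contains ((pvBuildIdx next).2.getD (kv.1, kv.2) PySem.Set.empty) (k : Int)))
    (Q := fun n => pvCompatA r n)
    (g := fun n => r.update n.items) (d := PySem.Dict.empty)
    (fun k hk => pv_cond_eq_compat next r hr k hk (hnext _ (List.getElem_mem hk)))
  rw [← this]
  apply List.map_congr_left
  intro k _
  simp [Function.comp]

-- canonical form of A's join step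
lemma pvStepA_eq (result next : List (PySem.Dict String Int)) :
    result.foldl (fun joined r =>
        next.foldl (fun joined n =>
          if pvCompatA r n then joined ++ [r.update n.items] else joined) joined) []
      = result.flatMap (fun r => (next.filter (fun n => pvCompatA r n)).map (fun n => r.update n.items)) := by
  rw [show (fun (joined : List (PySem.Dict String Int)) r =>
      next.foldl (fun joined n =>
        if pvCompatA r n then joined ++ [r.update n.items] else joined) joined)
    = (fun joined r => joined ++ (next.filter (fun n => pvCompatA r n)).map (fun n => r.update n.items)) from by
      funext joined r
      exact PySem.List.foldl_append_if _ _ _ _]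
  simpa using PySem.List.foldl_append_eq_flatMap
    (fun r => (next.filter (fun n => pvCompatA r n)).map (fun n => r.update n.items)) result []

-- canonical form of B's join step (under the dict-key invariants)
lemma pvStepB_eq (result next : List (PySem.Dict String Int))
    (hnext : ∀ n ∈ next, n.keys.Nodup) (hres : ∀ r ∈ result, r.keys.Nodup) :
    pvJoinStepB result next
      = result.flatMap (fun r => (next.filter (fun n => pvCompatA r n)).map (fun n => r.update n.items)) := by
  unfold pvJoinStepB
  simp only []
  show List.foldl _ [] result = _
  have hcong := PySem.List.foldl_congr_mem' (l := result) (init := ([] : List (PySem.Dict String Int)))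
    (f := fun joined r => (pvProbe (pvBuildIdx next).1 (pvBuildIdx next).2 (PySem.List.len next) r).foldl
      (fun joined i => joined ++ [r.update (PySem.List.pyGetD next i PySem.Dict.empty).items]) joined)
    (g := fun joined r => joined ++ (next.filter (fun n => pvCompatA r n)).map (fun n => r.update n.items))
    (by
      intro r hrmem joined
      dsimp only
      rw [PySem.List.foldl_append_singleton_eq_map, pv_probe_map next r hnext (hres r hrmem)])
  rw [hcong]
  simpa using PySem.List.foldl_append_eq_flatMap
    (fun r => (next.filter (fun n => pvCompatA r n)).map (fun n => r.update n.items)) result []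

-- the two outer folds agree, maintaining the key-uniqueness invariant
lemma pvFold_eq (rest : List (List (PySem.Dict String Int)))
    (h : ∀ next ∈ rest, ∀ n ∈ next, n.keys.Nodup) :
    ∀ (result : List (PySem.Dict String Int)), (∀ r ∈ result, r.keys.Nodup) →
    rest.foldl (fun result next_match =>
        result.foldl (fun joined r =>
          next_match.foldl (fun joined n =>
            if pvCompatA r n then joined ++ [r.update n.items] else joined) joined) []) result
      = rest.foldl (fun result next_match => pvJoinStepB result next_match) result := by
  induction rest with
  | nil => intro result _; rfl
  | cons next rst ih =>
    intro result hres
    simp only [List.foldl_cons]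
    rw [pvStepA_eq, ← pvStepB_eq result next (h next (by simp)) hres]
    apply ih (fun m hm => h m (by simp [hm]))
    intro m hm
    rw [pvStepB_eq result next (h next (by simp)) hres] at hm
    rcases List.mem_flatMap.1 hm with ⟨r, hrmem, hmm⟩
    rcases List.mem_map.1 hmm with ⟨n, _, rfl⟩
    exact PySem.Dict.nodup_keys_update _ _ (hres r hrmem)

lemma pvJoinA_eq_pvJoinB (pms : List (List (PySem.Dict String Int)))
    (h : ∀ next ∈ pms, ∀ n ∈ next, n.keys.Nodup) : pvJoinA pms = pvJoinB pms := by
  cases pms with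
  | nil => rfl
  | cons first rest =>
    unfold pvJoinA pvJoinB
    exact pvFold_eq rest (fun m hm => h m (by simp [hm])) first (h first (by simp))

-- ===== VERDICT (by name: the statement is the Claim_ definition above) =====
theorem join_matches_py_spec : Claim_equal_join_matches_py := by
  intro pm _hdom
  unfold Spec_join_matches_py join_matches_py join_matches_py_alt
  rw [pvJoinA_eq_pvJoinB]
  intro next hnext n hn
  simp only [List.mem_map] at hnext
  obtain ⟨m, _, rfl⟩ := hnext
  simp only [List.mem_map] at hn
  obtain ⟨l, _, rfl⟩ := hn
  exact PySem.Dict.nodup_keys_ofList l
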